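-- pv_equiv track=rewrite | github.com/devscanr/extractors | extractors/ppatterns.py | expand_dashes
-- ===== SOURCE A (Python) =====
-- def expand_dashes(phrase: str) -> list[str]:
--   if not phrase:
--     return []
--   dotequal_i, equal_i, dash_i = phrase.find(".="), phrase.find("="), phrase.find("-")
--   l = len(phrase)
--   first_cc = min(l, l, *[i for i in [dotequal_i, equal_i, dash_i] if i != -1])
--   if first_cc == dotequal_i:
--     # TODO support also "/=" ?
--     # Handling ".="s
--     head, tail = phrase[0:dotequal_i], phrase[dotequal_i + 2:]
--     tail_patterns = expand_dashes(tail)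
--     return [
--       head + "." + pattern for pattern in tail_patterns
--     ] + [
--       head + "-" + pattern for pattern in tail_patterns
--     ] + [
--       head + " " + pattern for pattern in tail_patterns
--     ] + [
--       head + pattern for pattern in tail_patterns
--     ]
--   elif first_cc == equal_i:
--     # Handling "="s
--     head, tail = phrase[0:equal_i], phrase[equal_i + 1:]
--     tail_patterns = expand_dashes(tail)
--     return [
--       head + "-" + pattern for pattern in tail_patterns
--     ] + [
--       head + " " + pattern for pattern in tail_patterns
--     ] + [
--       head + pattern for pattern in tail_patterns
--     ]
--   elif first_cc == dash_i:
--     # Handling "-"s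
--     head, tail = phrase[0:dash_i], phrase[dash_i + 1:]
--     tail_patterns = expand_dashes(tail)
--     return [
--       head + "-" + pattern for pattern in tail_patterns
--     ] + [
--       head + " " + pattern for pattern in tail_patterns
--     ]
--   else:
--     return [phrase]
-- ===== SOURCE B (Python) =====
-- def expand_dashes(phrase: str) -> list[str]:
--   # One tokenizing pass collects literal segments and per-separator choice
--   # lists, then a cartesian product builds all combinations.
--   segments, choices = [], []
--   cur = ""
--   i, n = 0, len(phrase)
--   while i < n:
--     if phrase.startswith(".=", i):
--       segments.append(cur); choices.append([".", "-", " ", ""]); cur = ""; i += 2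
--     elif phrase[i] == "=":
--       segments.append(cur); choices.append(["-", " ", ""]); cur = ""; i += 1
--     elif phrase[i] == "-":
--       segments.append(cur); choices.append(["-", " "]); cur = ""; i += 1
--     else:
--       cur += phrase[i]; i += 1
--   segments.append(cur)
--   if segments[-1] == "":
--     # empty phrase, or phrase ending in a separator: no combinations
--     return []
--   combos = [[]]
--   for ch in choices:
--     combos = [combo + [opt] for combo in combos for opt in ch]
--   results = []
--   for combo in combos:
--     s = segments[0]
--     for sep, seg in zip(combo, segments[1:]):
--       s += sep + seg
--     results.append(s)
--   return results
-- ===== Notes on version B (the rewrite author's own statement) =====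
-- stated objective: alternative
-- what changed: Replaces A's recursive find-earliest-separator-and-expand with a single tokenizing pass that collects literal segments and per-separator choice lists, followed by an iterative cartesian product that glues each combination together.
import Mathlib
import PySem

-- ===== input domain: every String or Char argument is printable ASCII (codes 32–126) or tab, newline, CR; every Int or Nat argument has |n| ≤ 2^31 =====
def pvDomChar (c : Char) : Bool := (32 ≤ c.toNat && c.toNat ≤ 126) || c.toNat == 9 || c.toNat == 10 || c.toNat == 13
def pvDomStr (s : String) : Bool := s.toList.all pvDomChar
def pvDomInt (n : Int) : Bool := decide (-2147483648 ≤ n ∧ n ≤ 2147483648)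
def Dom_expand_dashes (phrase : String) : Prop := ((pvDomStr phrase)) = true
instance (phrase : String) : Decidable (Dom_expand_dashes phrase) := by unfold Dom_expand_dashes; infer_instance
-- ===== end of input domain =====

-- B replaces A's recursive find-earliest-separator-and-expand with one tokenizing
-- pass (segments + separator-choice lists) followed by an iterative cartesian product.

-- ===== PORT A =====
-- (both ports work on List Char, as PySem prescribes for string algorithms,
--  and are wrapped into String at the end)

-- used by expandA's decreasing_by: the ported min(l, l, *candidates) is ≥ 0
theorem pvFoldlMinNonneg (t : List Int) (a : Int) (ha : 0 ≤ a) (ht : ∀ x ∈ t, 0 ≤ x) :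
    0 ≤ t.foldl min a := by
  rcases PySem.List.foldl_min_mem t a with h | h
  · rw [h]; exact ha
  · exact ht _ h

-- used by expandA's decreasing_by
theorem pvFindMinNonneg (cs : List Char) :
    0 ≤ ((PySem.Chars.len cs : Int) :: ([PySem.Chars.find cs ['.', '='], PySem.Chars.find cs ['='],
      PySem.Chars.find cs ['-']].filter (fun i => i ≠ -1))).foldl min (PySem.Chars.len cs) := by
  apply pvFoldlMinNonneg
  · simp [PySem.Chars.len_eq]
  · intro x hx
    rcases List.mem_cons.1 hx with h | h
    · subst h; simp [PySem.Chars.len_eq]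
    · rw [List.mem_filter] at h
      obtain ⟨hm, hne⟩ := h
      have h1 : -1 ≤ x := by
        fin_cases hm <;> exact PySem.Chars.neg_one_le_find _ _
      simp at hne; omega

theorem pv_cc_nonneg (cs : List Char) (x : Int)
    (h : ((PySem.Chars.len cs : Int) :: ([PySem.Chars.find cs ['.', '='], PySem.Chars.find cs ['='],
      PySem.Chars.find cs ['-']].filter (fun i => i ≠ -1))).foldl min (PySem.Chars.len cs) = x) :
    0 ≤ x := h ▸ pvFindMinNonneg cs

-- used by expandA's decreasing_by: the sliced tail is shorter than the phrase
theorem pv_decA (cs pat : List Char) (off : Int) (h0 : ¬ cs = []) (hoff : 0 < off)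
    (hnn : 0 ≤ PySem.Chars.find cs pat) :
    (PySem.Chars.slice cs (some (PySem.Chars.find cs pat + off)) none).length < cs.length := by
  have hl : cs.length ≠ 0 := by simpa [List.length_eq_zero_iff] using h0
  rw [PySem.Chars.slice_eq_listSlice, PySem.List.slice_from cs (by omega)]
  simp only [List.length_drop]
  omega

def pvExpandA (cs : List Char) : List (List Char) :=
  if h0 : cs = [] then []
  else
    let dotequal_i := PySem.Chars.find cs ['.', '=']
    let equal_i := PySem.Chars.find cs ['=']
    let dash_i := PySem.Chars.find cs ['-']
    let l : Int := PySem.Chars.len cs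
    let first_cc := (l :: ([dotequal_i, equal_i, dash_i].filter (fun i => i ≠ -1))).foldl min l
    if hd : first_cc = dotequal_i then
      let head := PySem.Chars.slice cs (some 0) (some dotequal_i)
      let tail := PySem.Chars.slice cs (some (dotequal_i + 2)) none
      let tp := pvExpandA tail
      tp.map (fun p => head ++ ['.'] ++ p) ++ tp.map (fun p => head ++ ['-'] ++ p) ++
        tp.map (fun p => head ++ [' '] ++ p) ++ tp.map (fun p => head ++ p)
    else if he : first_cc = equal_i then
      let head := PySem.Chars.slice cs (some 0) (some equal_i)
      let tail := PySem.Chars.slice cs (some (equal_i + 1)) none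
      let tp := pvExpandA tail
      tp.map (fun p => head ++ ['-'] ++ p) ++ tp.map (fun p => head ++ [' '] ++ p) ++
        tp.map (fun p => head ++ p)
    else if hh : first_cc = dash_i then
      let head := PySem.Chars.slice cs (some 0) (some dash_i)
      let tail := PySem.Chars.slice cs (some (dash_i + 1)) none
      let tp := pvExpandA tail
      tp.map (fun p => head ++ ['-'] ++ p) ++ tp.map (fun p => head ++ [' '] ++ p)
    else [cs]
termination_by cs.length
decreasing_by
  · exact pv_decA cs ['.', '='] 2 h0 (by norm_num) (pv_cc_nonneg cs _ hd)
  · exact pv_decA cs ['='] 1 h0 (by norm_num) (pv_cc_nonneg cs _ he)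
  · exact pv_decA cs ['-'] 1 h0 (by norm_num) (pv_cc_nonneg cs _ hh)

def expand_dashes (phrase : String) : List String :=
  (pvExpandA phrase.toList).map String.ofList

-- ===== PORT B =====

-- used by pvTokenize's decreasing_by
theorem pv_dec_drop1 (c : Char) (rest : List Char) : (rest.drop 1).length < (c :: rest).length := by
  simp only [List.length_drop, List.length_cons]
  omega

-- used by pvTokenize's decreasing_by
theorem pv_dec_tail (c : Char) (rest : List Char) : rest.length < (c :: rest).length := by
  simp

-- the while loop of Source B: collect literal segments and separator-choice lists
def pvTokenize (cs : List Char) (acc : List Char) :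
    List (List Char) × List (List (List Char)) :=
  match cs with
  | [] => ([acc], [])
  | c :: rest =>
    if c = '.' ∧ rest.take 1 = ['='] then
      let r := pvTokenize (rest.drop 1) []
      (acc :: r.1, [['.'], ['-'], [' '], []] :: r.2)
    else if c = '=' then
      let r := pvTokenize rest []
      (acc :: r.1, [['-'], [' '], []] :: r.2)
    else if c = '-' then
      let r := pvTokenize rest []
      (acc :: r.1, [['-'], [' ']] :: r.2)
    else pvTokenize rest (acc ++ [c])
termination_by cs.length
decreasing_by
  · exact pv_dec_drop1 c rest
  · exact pv_dec_tail _ rest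
  · exact pv_dec_tail _ rest
  · exact pv_dec_tail c rest

-- the 'combos' loop of Source B (iterative cartesian product, leftmost slowest)
def pvProduct (chs : List (List (List Char))) : List (List (List Char)) :=
  chs.foldl (fun combos ch => combos.flatMap (fun combo => ch.map (fun opt => combo ++ [opt]))) [[]]

-- the inner 'for sep, seg in zip(combo, segments[1:])' loop of Source B
def pvGlue (segs : List (List Char)) (combo : List (List Char)) : List Char :=
  (combo.zip segs.tail).foldl (fun s x => s ++ x.1 ++ x.2) (segs.headD [])

def pvExpandB (cs : List Char) : List (List Char) :=
  let r := pvTokenize cs []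
  if r.1.getLastD [] = [] then []
  else (pvProduct r.2).map (pvGlue r.1)

def expand_dashes_alt (phrase : String) : List String :=
  (pvExpandB phrase.toList).map String.ofList

-- ===== PRECONDITION & SPEC =====
def Spec_expand_dashes (phrase : String) (out : List String) : Prop := out = expand_dashes_alt phrase
instance (phrase : String) (out : List String) : Decidable (Spec_expand_dashes phrase out) := by unfold Spec_expand_dashes; infer_instance

-- ===== CLAIM (what is proved, stated in full; the proofs are below) =====
def Claim_equal_expand_dashes : Prop := ∀ (phrase : String), Dom_expand_dashes phrase → Spec_expand_dashes phrase (expand_dashes phrase)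

-- ===== LEMMAS AND PROOFS =====
-- generic: shifting all candidates by one shifts the running minimum
theorem pv_filter_shift (xs : List Int) (hx : ∀ x ∈ xs, -1 ≤ x) :
    (xs.map (fun x => if x = -1 then -1 else x + 1)).filter (fun i => i ≠ -1)
      = (xs.filter (fun i => i ≠ -1)).map (fun x => x + 1) := by
  induction xs with
  | nil => simp
  | cons y ys ih =>
    have hy := hx y (by simp)
    have ih' := ih (fun x hm => hx x (by simp [hm]))
    by_cases h : y = -1
    · subst h; simpa [List.filter] using ih'
    · have h2 : ¬ (y + 1 = -1) := by omega
      simpa [List.filter, h, h2] using ih'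

theorem pv_foldl_min_shift (xs : List Int) (a : Int) :
    (xs.map (fun x => x + 1)).foldl min (a + 1) = xs.foldl min a + 1 := by
  induction xs generalizing a with
  | nil => simp
  | cons y ys ih =>
    simp only [List.map_cons, List.foldl_cons]
    rw [show min (a+1) (y+1) = min a y + 1 from by omega, ih]
theorem pv_find_prefix_zero (s pat : List Char) (h : pat <+: s) :
    PySem.Chars.find s pat = 0 := by
  have h0 : 0 ≤ PySem.Chars.find s pat := by
    rw [PySem.Chars.find_nonneg_iff]
    exact h.isInfix
  obtain ⟨hpre, hmin⟩ := PySem.Chars.find_spec h0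
  by_contra hne
  have hpos : 0 < (PySem.Chars.find s pat).toNat := by omega
  exact hmin 0 hpos (by simpa using h)

theorem pv_find_cons_shift (c : Char) (rest pat : List Char) (h : ¬ pat <+: (c :: rest)) :
    PySem.Chars.find (c :: rest) pat =
      if PySem.Chars.find rest pat = -1 then -1 else PySem.Chars.find rest pat + 1 := by
  by_cases hin : pat <:+: (c :: rest)
  · have htail : pat <:+: rest := by
      rcases List.infix_cons_iff.1 hin with h1 | h1
      · exact absurd h1 h
      · exact h1
    have hg : 0 ≤ PySem.Chars.find rest pat := by rw [PySem.Chars.find_nonneg_iff]; exact htail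
    have hf : 0 ≤ PySem.Chars.find (c :: rest) pat := by rw [PySem.Chars.find_nonneg_iff]; exact hin
    obtain ⟨hfp, hfm⟩ := PySem.Chars.find_spec hf
    obtain ⟨hgp, hgm⟩ := PySem.Chars.find_spec hg
    set f := PySem.Chars.find (c :: rest) pat with hfdef
    set g := PySem.Chars.find rest pat with hgdef
    have hf0 : f.toNat ≠ 0 := by
      intro h0
      rw [h0] at hfp
      exact h (by simpa using hfp)
    have hdropf : List.drop f.toNat (c :: rest) = List.drop (f.toNat - 1) rest := by
      rcases Nat.exists_eq_succ_of_ne_zero hf0 with ⟨k, hk⟩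
      rw [hk]; simp
    have h1 : ¬ (f.toNat - 1 < g.toNat) := by
      intro hlt
      exact hgm _ hlt (by rw [← hdropf]; exact hfp)
    have h2 : ¬ (g.toNat + 1 < f.toNat) := by
      intro hlt
      exact hfm (g.toNat + 1) hlt (by simpa using hgp)
    have : f = g + 1 := by omega
    rw [this, if_neg (by omega)]
  · have h1 : PySem.Chars.find (c :: rest) pat = -1 := (PySem.Chars.find_eq_neg_one_iff _ _).2 hin
    have h2 : PySem.Chars.find rest pat = -1 := by
      rw [PySem.Chars.find_eq_neg_one_iff]
      exact fun hx => hin (List.infix_cons hx)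
    rw [h1, h2, if_pos rfl]
-- foldr form of the cartesian product, used only in proofs
def pvProdR (chs : List (List (List Char))) : List (List (List Char)) :=
  chs.foldr (fun ch acc => ch.flatMap (fun o => acc.map (o :: ·))) [[]]

theorem pv_product_aux (chs : List (List (List Char))) (combos : List (List (List Char))) :
    chs.foldl (fun combos ch => combos.flatMap (fun combo => ch.map (fun opt => combo ++ [opt]))) combos
      = combos.flatMap (fun cb => (pvProdR chs).map (cb ++ ·)) := by
  induction chs generalizing combos with
  | nil => simp [pvProdR]
  | cons ch chs ih =>
    simp only [List.foldl_cons]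
    rw [ih]
    simp only [pvProdR, List.foldr_cons, List.flatMap_assoc, List.flatMap_map, List.map_flatMap,
      List.map_map, Function.comp_def]
    refine List.flatMap_congr (fun cb _ => ?_)
    refine List.flatMap_congr (fun a _ => ?_)
    refine List.map_congr_left (fun x _ => ?_)
    simp

theorem pv_product_cons (ch : List (List Char)) (chs : List (List (List Char))) :
    pvProduct (ch :: chs) = ch.flatMap (fun o => (pvProduct chs).map (o :: ·)) := by
  unfold pvProduct
  rw [pv_product_aux, pv_product_aux]
  simp [pvProdR, List.map_flatMap, List.map_map, Function.comp_def]

theorem pv_product_nil : pvProduct [] = [[]] := rfl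

theorem pv_glue_aux (l : List (List Char × List Char)) (a b : List Char) :
    l.foldl (fun s x => s ++ x.1 ++ x.2) (a ++ b) = a ++ l.foldl (fun s x => s ++ x.1 ++ x.2) b := by
  induction l generalizing b with
  | nil => simp
  | cons y ys ih =>
    simp only [List.foldl_cons]
    have h : a ++ b ++ y.1 ++ y.2 = a ++ (b ++ y.1 ++ y.2) := by simp
    rw [h, ih]

theorem pv_glue_cons (s : List Char) (ss : List (List Char)) (o : List Char)
    (oo : List (List Char)) (hss : ss ≠ []) :
    pvGlue (s :: ss) (o :: oo) = s ++ o ++ pvGlue ss oo := by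
  obtain ⟨t, ts, rfl⟩ := List.exists_cons_of_ne_nil hss
  unfold pvGlue
  simp only [List.tail_cons, List.zip_cons_cons, List.foldl_cons, List.headD_cons]
  rw [show s ++ o ++ t = (s ++ o) ++ (([] : List Char) ++ t) from by simp,
    pv_glue_aux, List.append_assoc]
  simp
theorem pv_tok_nil (acc : List Char) : pvTokenize [] acc = ([acc], []) := by
  simp [pvTokenize]

theorem pv_tok_de (rest acc : List Char) :
    pvTokenize ('.' :: '=' :: rest) acc =
      (acc :: (pvTokenize rest []).1, [['.'], ['-'], [' '], []] :: (pvTokenize rest []).2) := by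
  rw [pvTokenize]
  simp

theorem pv_tok_eq (rest acc : List Char) :
    pvTokenize ('=' :: rest) acc =
      (acc :: (pvTokenize rest []).1, [['-'], [' '], []] :: (pvTokenize rest []).2) := by
  rw [pvTokenize]
  simp

theorem pv_tok_da (rest acc : List Char) :
    pvTokenize ('-' :: rest) acc =
      (acc :: (pvTokenize rest []).1, [['-'], [' ']] :: (pvTokenize rest []).2) := by
  rw [pvTokenize]
  simp

theorem pv_tok_other (c : Char) (rest acc : List Char)
    (h1 : ¬ (c = '.' ∧ rest.take 1 = ['='])) (h2 : c ≠ '=') (h3 : c ≠ '-') :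
    pvTokenize (c :: rest) acc = pvTokenize rest (acc ++ [c]) := by
  rw [pvTokenize]
  simp [h1, h2, h3]

theorem pv_tok_len (cs acc : List Char) :
    (pvTokenize cs acc).1.length = (pvTokenize cs acc).2.length + 1 := by
  induction cs, acc using pvTokenize.induct with
  | case1 acc => simp [pv_tok_nil]
  | case2 acc c rest h ih =>
    obtain ⟨hc, ht⟩ := h
    subst hc
    obtain ⟨r', rfl⟩ : ∃ r', rest = '=' :: r' := by
      cases rest with
      | nil => simp at ht
      | cons a l => simp at ht; exact ⟨l, by rw [ht]⟩
    simpa [pv_tok_de] using ih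
  | case3 acc rest h1 ih =>
    simpa [pv_tok_eq] using ih
  | case4 acc rest h1 h2 ih =>
    simpa [pv_tok_da] using ih
  | case5 acc c rest h1 h2 h3 ih =>
    simpa [pv_tok_other c rest acc h1 h2 h3] using ih
theorem pv_tok_single (cs acc : List Char) (h : (pvTokenize cs acc).2 = []) :
    pvTokenize cs acc = ([acc ++ cs], []) := by
  induction cs, acc using pvTokenize.induct with
  | case1 acc => simp [pv_tok_nil]
  | case2 acc c rest hc ih =>
    obtain ⟨hc1, ht⟩ := hc
    subst hc1
    obtain ⟨r', rfl⟩ : ∃ r', rest = '=' :: r' := by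
      cases rest with
      | nil => simp at ht
      | cons a l => simp at ht; exact ⟨l, by rw [ht]⟩
    rw [pv_tok_de] at h
    simp at h
  | case3 acc rest h1 ih =>
    rw [pv_tok_eq] at h
    simp at h
  | case4 acc rest h1 h2 ih =>
    rw [pv_tok_da] at h
    simp at h
  | case5 acc c rest h1 h2 h3 ih =>
    rw [pv_tok_other c rest acc h1 h2 h3] at h ⊢
    rw [ih h]
    simp

theorem pv_tok_shift : ∀ (n : Nat) (cs : List Char), cs.length ≤ n → ∀ acc : List Char,
    ∃ s ss chs, pvTokenize cs [] = (s :: ss, chs) ∧ pvTokenize cs acc = ((acc ++ s) :: ss, chs) := by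
  intro n
  induction n with
  | zero =>
    intro cs hcs acc
    have : cs = [] := by cases cs <;> simp_all
    subst this
    exact ⟨[], [], [], by simp [pv_tok_nil]⟩
  | succ n ih =>
    intro cs hcs acc
    match cs with
    | [] => exact ⟨[], [], [], by simp [pv_tok_nil]⟩
    | c :: rest =>
      by_cases h1 : c = '.' ∧ rest.take 1 = ['=']
      · obtain ⟨hc1, ht⟩ := h1
        subst hc1
        obtain ⟨r', rfl⟩ : ∃ r', rest = '=' :: r' := by
          cases rest with
          | nil => simp at ht
          | cons a l => simp at ht; exact ⟨l, by rw [ht]⟩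
        exact ⟨[], (pvTokenize r' []).1, [['.'], ['-'], [' '], []] :: (pvTokenize r' []).2, by simp [pv_tok_de], by simp [pv_tok_de]⟩
      · by_cases h2 : c = '='
        · subst h2
          exact ⟨[], (pvTokenize rest []).1, [['-'], [' '], []] :: (pvTokenize rest []).2, by simp [pv_tok_eq], by simp [pv_tok_eq]⟩
        · by_cases h3 : c = '-'
          · subst h3
            exact ⟨[], (pvTokenize rest []).1, [['-'], [' ']] :: (pvTokenize rest []).2, by simp [pv_tok_da], by simp [pv_tok_da]⟩
          · have hlen : rest.length ≤ n := by simp at hcs; omega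
            obtain ⟨s, ss, chs, hA, hB⟩ := ih rest hlen [c]
            obtain ⟨s2, ss2, chs2, hA2, hB2⟩ := ih rest hlen (acc ++ [c])
            rw [hA] at hA2
            injection hA2 with hx hy
            injection hx with hx1 hx2
            refine ⟨c :: s, ss, chs, ?_, ?_⟩
            · rw [pv_tok_other c rest [] h1 h2 h3]
              simpa using hB
            · rw [pv_tok_other c rest acc h1 h2 h3]
              rw [hB2, hx1, hx2, hy]
              simp
theorem pv_glue_head (c : Char) (s : List Char) (ss : List (List Char)) (cb : List (List Char)) :
    pvGlue ((c :: s) :: ss) cb = c :: pvGlue (s :: ss) cb := by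
  unfold pvGlue
  simp only [List.tail_cons, List.headD_cons]
  have := pv_glue_aux (cb.zip ss) [c] s
  simpa using this

-- the getLastD guard ignores the head of a two-or-more list
theorem pv_getLastD_cons_cons' (a b : List Char) (l : List (List Char)) :
    (a :: b :: l).getLast?.getD [] = (b :: l).getLast?.getD [] := by
  simp

theorem pv_B_nil : pvExpandB [] = [] := by
  simp [pvExpandB, pv_tok_nil]

theorem pv_B_de (rest : List Char) :
    pvExpandB ('.' :: '=' :: rest) =
      (pvExpandB rest).map (fun p => '.' :: p) ++ (pvExpandB rest).map (fun p => '-' :: p) ++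
      (pvExpandB rest).map (fun p => ' ' :: p) ++ pvExpandB rest := by
  obtain ⟨s0, ss0, chs0, h0, -⟩ := pv_tok_shift rest.length rest le_rfl []
  unfold pvExpandB
  rw [pv_tok_de, h0]
  simp only [List.getLastD_eq_getLast?, pv_getLastD_cons_cons']
  by_cases hg : (s0 :: ss0).getLast?.getD [] = []
  · simp [List.getLastD_eq_getLast?, hg]
  · rw [if_neg hg, if_neg hg, pv_product_cons]
    simp only [List.map_flatMap, List.map_map, Function.comp_def]
    have hglue : ∀ (o : List Char) (cb : List (List Char)),
        pvGlue ([] :: s0 :: ss0) (o :: cb) = o ++ pvGlue (s0 :: ss0) cb := by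
      intro o cb
      rw [pv_glue_cons [] (s0 :: ss0) o cb (by simp)]
      simp
    simp only [hglue]
    simp [List.map_map, Function.comp_def]

theorem pv_B_eq (rest : List Char) :
    pvExpandB ('=' :: rest) =
      (pvExpandB rest).map (fun p => '-' :: p) ++ (pvExpandB rest).map (fun p => ' ' :: p) ++
      pvExpandB rest := by
  obtain ⟨s0, ss0, chs0, h0, -⟩ := pv_tok_shift rest.length rest le_rfl []
  unfold pvExpandB
  rw [pv_tok_eq, h0]
  simp only [List.getLastD_eq_getLast?, pv_getLastD_cons_cons']
  by_cases hg : (s0 :: ss0).getLast?.getD [] = []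
  · simp [List.getLastD_eq_getLast?, hg]
  · rw [if_neg hg, if_neg hg, pv_product_cons]
    simp only [List.map_flatMap, List.map_map, Function.comp_def]
    have hglue : ∀ (o : List Char) (cb : List (List Char)),
        pvGlue ([] :: s0 :: ss0) (o :: cb) = o ++ pvGlue (s0 :: ss0) cb := by
      intro o cb
      rw [pv_glue_cons [] (s0 :: ss0) o cb (by simp)]
      simp
    simp only [hglue]
    simp [List.map_map, Function.comp_def]

theorem pv_B_da (rest : List Char) :
    pvExpandB ('-' :: rest) =
      (pvExpandB rest).map (fun p => '-' :: p) ++ (pvExpandB rest).map (fun p => ' ' :: p) := by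
  obtain ⟨s0, ss0, chs0, h0, -⟩ := pv_tok_shift rest.length rest le_rfl []
  unfold pvExpandB
  rw [pv_tok_da, h0]
  simp only [List.getLastD_eq_getLast?, pv_getLastD_cons_cons']
  by_cases hg : (s0 :: ss0).getLast?.getD [] = []
  · simp [List.getLastD_eq_getLast?, hg]
  · rw [if_neg hg, if_neg hg, pv_product_cons]
    simp only [List.map_flatMap, List.map_map, Function.comp_def]
    have hglue : ∀ (o : List Char) (cb : List (List Char)),
        pvGlue ([] :: s0 :: ss0) (o :: cb) = o ++ pvGlue (s0 :: ss0) cb := by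
      intro o cb
      rw [pv_glue_cons [] (s0 :: ss0) o cb (by simp)]
      simp
    simp only [hglue]
    simp [List.map_map, Function.comp_def]

theorem pv_B_other (c : Char) (rest : List Char) (hrest : rest ≠ [])
    (h1 : ¬ (c = '.' ∧ rest.take 1 = ['='])) (h2 : c ≠ '=') (h3 : c ≠ '-') :
    pvExpandB (c :: rest) = (pvExpandB rest).map (fun p => c :: p) := by
  obtain ⟨s0, ss0, chs0, h0, hc0⟩ := pv_tok_shift rest.length rest le_rfl [c]
  unfold pvExpandB
  rw [pv_tok_other c rest [] h1 h2 h3]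
  have hc0' : pvTokenize rest [c] = ((c :: s0) :: ss0, chs0) := by simpa using hc0
  simp only [List.nil_append]
  rw [hc0', h0]
  cases ss0 with
  | nil =>
    have hchs : chs0 = [] := by
      have := pv_tok_len rest []
      rw [h0] at this
      simpa using this
    subst hchs
    have hsingle := pv_tok_single rest [] (by rw [h0])
    rw [h0] at hsingle
    injection hsingle with hx hy
    injection hx with hx1 hx2
    simp only [List.nil_append] at hx1
    subst hx1
    rw [if_neg (by simp), if_neg (by simpa using hrest)]
    simp [pv_product_nil, pvGlue]
  | cons t ts =>
    simp only [List.getLastD_eq_getLast?, pv_getLastD_cons_cons']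
    by_cases hg : (t :: ts).getLast?.getD [] = []
    · simp [hg]
    · rw [if_neg hg, if_neg hg, List.map_map]
      exact List.map_congr_left (fun cb _ => by simpa using pv_glue_head c s0 (t :: ts) cb)
theorem pv_min_eq_zero (l : Int) (xs : List Int) (hl : 0 ≤ l) (hx : ∀ x ∈ xs, -1 ≤ x)
    (h0 : 0 ∈ xs) : (l :: xs.filter (fun i => i ≠ -1)).foldl min l = 0 := by
  have hle := (PySem.List.foldl_min_le (l :: xs.filter (fun i => i ≠ -1)) l).2 0
    (by simp [List.mem_filter]; exact Or.inr h0)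
  have hge : 0 ≤ (l :: xs.filter (fun i => i ≠ -1)).foldl min l := by
    apply pvFoldlMinNonneg _ _ hl
    intro x hxm
    rcases List.mem_cons.1 hxm with h | h
    · subst h; exact hl
    · rw [List.mem_filter] at h
      have := hx x h.1
      have h2 := h.2
      simp at h2
      omega
  omega

theorem pv_find_ne_zero (s pat : List Char) (h : ¬ pat <+: s) :
    PySem.Chars.find s pat ≠ 0 := by
  intro h0
  have hnn : 0 ≤ PySem.Chars.find s pat := by rw [h0]
  obtain ⟨hp, -⟩ := PySem.Chars.find_spec hnn
  rw [h0] at hp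
  simp at hp
  exact h hp

theorem pv_A_nil : pvExpandA [] = [] := by
  rw [pvExpandA]
  simp

theorem pv_A_de (rest : List Char) :
    pvExpandA ('.' :: '=' :: rest) =
      (pvExpandA rest).map (fun p => '.' :: p) ++ (pvExpandA rest).map (fun p => '-' :: p) ++
      (pvExpandA rest).map (fun p => ' ' :: p) ++ pvExpandA rest := by
  have hd0 : PySem.Chars.find ('.' :: '=' :: rest) ['.', '='] = 0 :=
    pv_find_prefix_zero _ _ ⟨rest, rfl⟩
  have hF : ((PySem.Chars.len ('.' :: '=' :: rest) : Int) ::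
      ([(0 : Int), PySem.Chars.find ('.' :: '=' :: rest) ['='],
        PySem.Chars.find ('.' :: '=' :: rest) ['-']].filter (fun i => i ≠ -1))).foldl min
        (PySem.Chars.len ('.' :: '=' :: rest)) = 0 := by
    apply pv_min_eq_zero
    · simp [PySem.Chars.len_eq]
      positivity
    · intro x hxm
      fin_cases hxm
      · omega
      · exact PySem.Chars.neg_one_le_find _ _
      · exact PySem.Chars.neg_one_le_find _ _
    · simp
  have hhead : PySem.Chars.slice ('.' :: '=' :: rest) (some 0) (some 0) = [] := by
    simp [pysem]
  have htail : PySem.Chars.slice ('.' :: '=' :: rest) (some (0 + 2)) none = rest := by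
    norm_num
    rw [PySem.List.slice_from _ (by omega), show Int.toNat 2 = 2 from rfl]
    rfl
  rw [pvExpandA]
  rw [dif_neg (by simp)]
  simp only [hd0, hF, hhead, htail]
  simp
theorem pv_A_eq (rest : List Char) :
    pvExpandA ('=' :: rest) =
      (pvExpandA rest).map (fun p => '-' :: p) ++ (pvExpandA rest).map (fun p => ' ' :: p) ++
      pvExpandA rest := by
  have he0 : PySem.Chars.find ('=' :: rest) ['='] = 0 :=
    pv_find_prefix_zero _ _ ⟨rest, rfl⟩
  have hdne : (0 : Int) ≠ PySem.Chars.find ('=' :: rest) ['.', '='] := by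
    have := pv_find_ne_zero ('=' :: rest) ['.', '='] (by
      intro h
      rcases List.cons_prefix_cons.1 h with ⟨h1, -⟩
      simp at h1)
    omega
  have hF : ((PySem.Chars.len ('=' :: rest) : Int) ::
      ([PySem.Chars.find ('=' :: rest) ['.', '='], (0 : Int),
        PySem.Chars.find ('=' :: rest) ['-']].filter (fun i => i ≠ -1))).foldl min
        (PySem.Chars.len ('=' :: rest)) = 0 := by
    apply pv_min_eq_zero
    · simp [PySem.Chars.len_eq]
      positivity
    · intro x hxm
      fin_cases hxm
      · exact PySem.Chars.neg_one_le_find _ _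
      · omega
      · exact PySem.Chars.neg_one_le_find _ _
    · simp
  have hhead : PySem.Chars.slice ('=' :: rest) (some 0) (some 0) = [] := by
    simp [pysem]
  have htail : PySem.Chars.slice ('=' :: rest) (some (0 + 1)) none = rest := by
    norm_num
    rw [PySem.List.slice_from _ (by omega), show Int.toNat 1 = 1 from rfl]
    rfl
  rw [pvExpandA]
  rw [dif_neg (by simp)]
  simp only [he0, hF, dif_neg hdne, hhead, htail]
  simp

theorem pv_A_da (rest : List Char) :
    pvExpandA ('-' :: rest) =
      (pvExpandA rest).map (fun p => '-' :: p) ++ (pvExpandA rest).map (fun p => ' ' :: p) := by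
  have hh0 : PySem.Chars.find ('-' :: rest) ['-'] = 0 :=
    pv_find_prefix_zero _ _ ⟨rest, rfl⟩
  have hdne : (0 : Int) ≠ PySem.Chars.find ('-' :: rest) ['.', '='] := by
    have := pv_find_ne_zero ('-' :: rest) ['.', '='] (by
      intro h
      rcases List.cons_prefix_cons.1 h with ⟨h1, -⟩
      simp at h1)
    omega
  have hene : (0 : Int) ≠ PySem.Chars.find ('-' :: rest) ['='] := by
    have := pv_find_ne_zero ('-' :: rest) ['='] (by
      intro h
      rcases List.cons_prefix_cons.1 h with ⟨h1, -⟩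
      simp at h1)
    omega
  have hF : ((PySem.Chars.len ('-' :: rest) : Int) ::
      ([PySem.Chars.find ('-' :: rest) ['.', '='], PySem.Chars.find ('-' :: rest) ['='],
        (0 : Int)].filter (fun i => i ≠ -1))).foldl min
        (PySem.Chars.len ('-' :: rest)) = 0 := by
    apply pv_min_eq_zero
    · simp [PySem.Chars.len_eq]
      positivity
    · intro x hxm
      fin_cases hxm
      · exact PySem.Chars.neg_one_le_find _ _
      · exact PySem.Chars.neg_one_le_find _ _
      · omega
    · simp
  have hhead : PySem.Chars.slice ('-' :: rest) (some 0) (some 0) = [] := by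
    simp [pysem]
  have htail : PySem.Chars.slice ('-' :: rest) (some (0 + 1)) none = rest := by
    norm_num
    rw [PySem.List.slice_from _ (by omega), show Int.toNat 1 = 1 from rfl]
    rfl
  rw [pvExpandA]
  rw [dif_neg (by simp)]
  simp only [hh0, hF, dif_neg hdne, dif_neg hene, hhead, htail]
  simp
theorem pv_slice_head_shift (c : Char) (rest : List Char) (a : Int) (ha : 0 ≤ a) :
    PySem.Chars.slice (c :: rest) (some 0) (some (a + 1)) =
      c :: PySem.Chars.slice rest (some 0) (some a) := by
  rw [PySem.Chars.slice_eq_listSlice, PySem.Chars.slice_eq_listSlice,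
    PySem.List.slice_zero_start, PySem.List.slice_zero_start,
    PySem.List.slice_to _ (by omega : (0:Int) ≤ a + 1), PySem.List.slice_to _ ha,
    show (a + 1).toNat = a.toNat + 1 by omega, List.take_succ_cons]

theorem pv_slice_tail_shift (c : Char) (rest : List Char) (a : Int) (ha : 0 ≤ a) :
    PySem.Chars.slice (c :: rest) (some (a + 1)) none =
      PySem.Chars.slice rest (some a) none := by
  rw [PySem.Chars.slice_eq_listSlice, PySem.Chars.slice_eq_listSlice,
    PySem.List.slice_from _ (by omega : (0:Int) ≤ a + 1), PySem.List.slice_from _ ha,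
    show (a + 1).toNat = a.toNat + 1 by omega, List.drop_succ_cons]

theorem pv_A_single (c : Char) (h2 : c ≠ '=') (h3 : c ≠ '-') : pvExpandA [c] = [[c]] := by
  have hd : PySem.Chars.find [c] ['.', '='] = -1 := by
    rw [PySem.Chars.find_eq_neg_one_iff]
    intro h
    have := h.sublist.length_le
    simp at this
  have he : PySem.Chars.find [c] ['='] = -1 := by
    rw [PySem.Chars.find_eq_neg_one_iff]
    intro h
    have : '=' ∈ [c] := h.subset (by simp)
    simp at this
    exact h2 this.symm
  have hh : PySem.Chars.find [c] ['-'] = -1 := by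
    rw [PySem.Chars.find_eq_neg_one_iff]
    intro h
    have : '-' ∈ [c] := h.subset (by simp)
    simp at this
    exact h3 this.symm
  rw [pvExpandA]
  rw [dif_neg (by simp)]
  simp only [hd, he, hh]
  norm_num [List.filter, PySem.Chars.len_eq]

theorem pv_A_other (c : Char) (rest : List Char) (hrest : rest ≠ [])
    (h1 : ¬ (c = '.' ∧ rest.take 1 = ['='])) (h2 : c ≠ '=') (h3 : c ≠ '-') :
    pvExpandA (c :: rest) = (pvExpandA rest).map (fun p => c :: p) := by
  have hp1 : ¬ ['.', '='] <+: (c :: rest) := by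
    intro h
    obtain ⟨hc, htl⟩ := List.cons_prefix_cons.1 h
    obtain ⟨t, ht⟩ := htl
    exact h1 ⟨hc.symm, by rw [← ht]; rfl⟩
  have hp2 : ¬ ['='] <+: (c :: rest) := by
    intro h
    obtain ⟨hc, -⟩ := List.cons_prefix_cons.1 h
    exact h2 hc.symm
  have hp3 : ¬ ['-'] <+: (c :: rest) := by
    intro h
    obtain ⟨hc, -⟩ := List.cons_prefix_cons.1 h
    exact h3 hc.symm
  have hd := pv_find_cons_shift c rest ['.', '='] hp1
  have he := pv_find_cons_shift c rest ['='] hp2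
  have hh := pv_find_cons_shift c rest ['-'] hp3
  have hd1 : -1 ≤ PySem.Chars.find rest ['.', '='] := PySem.Chars.neg_one_le_find _ _
  have he1 : -1 ≤ PySem.Chars.find rest ['='] := PySem.Chars.neg_one_le_find _ _
  have hh1 : -1 ≤ PySem.Chars.find rest ['-'] := PySem.Chars.neg_one_le_find _ _
  have hF'0 := pvFindMinNonneg rest
  have hF : ((PySem.Chars.len (c :: rest) : Int) ::
      ([if PySem.Chars.find rest ['.', '='] = -1 then -1 else PySem.Chars.find rest ['.', '='] + 1,
        if PySem.Chars.find rest ['='] = -1 then -1 else PySem.Chars.find rest ['='] + 1,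
        if PySem.Chars.find rest ['-'] = -1 then -1 else PySem.Chars.find rest ['-'] + 1].filter
          (fun i => i ≠ -1))).foldl min (PySem.Chars.len (c :: rest)) =
      ((PySem.Chars.len rest : Int) ::
        ([PySem.Chars.find rest ['.', '='], PySem.Chars.find rest ['='],
          PySem.Chars.find rest ['-']].filter (fun i => i ≠ -1))).foldl min
          (PySem.Chars.len rest) + 1 := by
    have hlen : (PySem.Chars.len (c :: rest) : Int) = (PySem.Chars.len rest : Int) + 1 := by
      simp [PySem.Chars.len_eq]
    rw [hlen]
    have hmap : [if PySem.Chars.find rest ['.', '='] = -1 then -1 else PySem.Chars.find rest ['.', '='] + 1,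
        if PySem.Chars.find rest ['='] = -1 then -1 else PySem.Chars.find rest ['='] + 1,
        if PySem.Chars.find rest ['-'] = -1 then -1 else PySem.Chars.find rest ['-'] + 1] =
        [PySem.Chars.find rest ['.', '='], PySem.Chars.find rest ['='],
          PySem.Chars.find rest ['-']].map (fun x => if x = -1 then -1 else x + 1) := by
      simp
    rw [hmap, pv_filter_shift _ (by intro x hx; fin_cases hx <;> assumption)]
    have hcons : ((PySem.Chars.len rest : Int) + 1) ::
        ([PySem.Chars.find rest ['.', '='], PySem.Chars.find rest ['='],
          PySem.Chars.find rest ['-']].filter (fun i => i ≠ -1)).map (fun x => x + 1) =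
        ((PySem.Chars.len rest : Int) ::
          [PySem.Chars.find rest ['.', '='], PySem.Chars.find rest ['='],
            PySem.Chars.find rest ['-']].filter (fun i => i ≠ -1)).map (fun x => x + 1) := by
      simp
    rw [hcons, pv_foldl_min_shift]
  rw [pvExpandA]
  rw [dif_neg (by simp)]
  conv_rhs => rw [pvExpandA]
  rw [dif_neg hrest]
  simp only [hd, he, hh, hF]
  set F' := ((PySem.Chars.len rest : Int) ::
      ([PySem.Chars.find rest ['.', '='], PySem.Chars.find rest ['='],
        PySem.Chars.find rest ['-']].filter (fun i => i ≠ -1))).foldl min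
        (PySem.Chars.len rest) with hF'def
  by_cases hb1 : F' = PySem.Chars.find rest ['.', '=']
  · have hdpos : 0 ≤ PySem.Chars.find rest ['.', '='] := hb1 ▸ hF'0
    have hite : (if PySem.Chars.find rest ['.', '='] = -1 then (-1 : Int)
        else PySem.Chars.find rest ['.', '='] + 1) = PySem.Chars.find rest ['.', '='] + 1 :=
      if_neg (by omega)
    rw [hite]
    rw [dif_pos (by omega), dif_pos hb1]
    rw [pv_slice_head_shift c rest _ hdpos,
      show PySem.Chars.find rest ['.', '='] + 1 + 2 = (PySem.Chars.find rest ['.', '='] + 2) + 1 by ring,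
      pv_slice_tail_shift c rest _ (by omega)]
    simp [Function.comp_def]
  · have hc1 : ¬ (((F' + 1 : Int)) = if PySem.Chars.find rest ['.', '='] = -1 then (-1 : Int)
        else PySem.Chars.find rest ['.', '='] + 1) := by
      by_cases hx : PySem.Chars.find rest ['.', '='] = -1 <;> simp [hx] <;> omega
    rw [dif_neg hc1, dif_neg hb1]
    by_cases hb2 : F' = PySem.Chars.find rest ['=']
    · have hepos : 0 ≤ PySem.Chars.find rest ['='] := hb2 ▸ hF'0
      have hite : (if PySem.Chars.find rest ['='] = -1 then (-1 : Int)
          else PySem.Chars.find rest ['='] + 1) = PySem.Chars.find rest ['='] + 1 :=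
        if_neg (by omega)
      rw [hite]
      rw [dif_pos (by omega), dif_pos hb2]
      rw [pv_slice_head_shift c rest _ hepos,
        show PySem.Chars.find rest ['='] + 1 + 1 = (PySem.Chars.find rest ['='] + 1) + 1 by ring,
        pv_slice_tail_shift c rest _ (by omega)]
      simp [Function.comp_def]
    · have hc2 : ¬ (((F' + 1 : Int)) = if PySem.Chars.find rest ['='] = -1 then (-1 : Int)
          else PySem.Chars.find rest ['='] + 1) := by
        by_cases hx : PySem.Chars.find rest ['='] = -1 <;> simp [hx] <;> omega
      rw [dif_neg hc2, dif_neg hb2]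
      by_cases hb3 : F' = PySem.Chars.find rest ['-']
      · have hhpos : 0 ≤ PySem.Chars.find rest ['-'] := hb3 ▸ hF'0
        have hite : (if PySem.Chars.find rest ['-'] = -1 then (-1 : Int)
            else PySem.Chars.find rest ['-'] + 1) = PySem.Chars.find rest ['-'] + 1 :=
          if_neg (by omega)
        rw [hite]
        rw [dif_pos (by omega), dif_pos hb3]
        rw [pv_slice_head_shift c rest _ hhpos,
          show PySem.Chars.find rest ['-'] + 1 + 1 = (PySem.Chars.find rest ['-'] + 1) + 1 by ring,
          pv_slice_tail_shift c rest _ (by omega)]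
        simp [Function.comp_def]
      · have hc3 : ¬ (((F' + 1 : Int)) = if PySem.Chars.find rest ['-'] = -1 then (-1 : Int)
            else PySem.Chars.find rest ['-'] + 1) := by
          by_cases hx : PySem.Chars.find rest ['-'] = -1 <;> simp [hx] <;> omega
        rw [dif_neg hc3, dif_neg hb3]
        simp
theorem pv_main_aux : ∀ (n : Nat) (cs : List Char), cs.length ≤ n → pvExpandA cs = pvExpandB cs := by
  intro n
  induction n with
  | zero =>
    intro cs hcs
    have : cs = [] := by cases cs <;> simp_all
    subst this
    rw [pv_A_nil, pv_B_nil]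
  | succ n ih =>
    intro cs hcs
    match cs with
    | [] => rw [pv_A_nil, pv_B_nil]
    | c :: rest =>
      by_cases h1 : c = '.' ∧ rest.take 1 = ['=']
      · obtain ⟨hc1, ht⟩ := h1
        subst hc1
        obtain ⟨r', rfl⟩ : ∃ r', rest = '=' :: r' := by
          cases rest with
          | nil => simp at ht
          | cons a l => simp at ht; exact ⟨l, by rw [ht]⟩
        have hlen : r'.length ≤ n := by simp at hcs; omega
        rw [pv_A_de, pv_B_de, ih r' hlen]
      · by_cases h2 : c = '='
        · subst h2
          have hlen : rest.length ≤ n := by simp at hcs; omega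
          rw [pv_A_eq, pv_B_eq, ih rest hlen]
        · by_cases h3 : c = '-'
          · subst h3
            have hlen : rest.length ≤ n := by simp at hcs; omega
            rw [pv_A_da, pv_B_da, ih rest hlen]
          · cases rest with
            | nil =>
              rw [pv_A_single c h2 h3]
              unfold pvExpandB
              rw [pv_tok_other c [] [] (by simp) h2 h3, pv_tok_nil]
              simp [pv_product_nil, pvGlue]
            | cons r rs =>
              have hlen : (r :: rs).length ≤ n := by simp at hcs; simp; omega
              rw [pv_A_other c (r :: rs) (by simp) h1 h2 h3,
                pv_B_other c (r :: rs) (by simp) h1 h2 h3, ih (r :: rs) hlen]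

theorem pv_main (cs : List Char) : pvExpandA cs = pvExpandB cs :=
  pv_main_aux cs.length cs le_rfl

-- ===== VERDICT (by name: the statement is the Claim_ definition above) =====
theorem expand_dashes_spec : Claim_equal_expand_dashes := by
  intro phrase _
  unfold Spec_expand_dashes expand_dashes expand_dashes_alt
  rw [pv_main]
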